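-- pv_equiv track=rewrite | github.com/SynoCommunity/spksrc | mk/get_resources.py | create_commands
-- ===== SOURCE A (Python) =====
-- def create_commands(input):
--     linkers = {}
--     if (input != ""):
--         links = input.split(" ")
--         for link in links:
--             # take the top folder as key
--             key = link.split("/", 1)[0]
--             if key in linkers:
--                 (linkers [ key ]).append(link)
--             else:
--                 linkers [ key ] = [ link ]
--     return linkers
-- ===== SOURCE B (Python) =====
-- def create_commands(input):
--     if input == "":
--         return {}
--     links = input.split(" ")
--     keys = []
--     seen = set()
--     for link in links:
--         k = link.split("/", 1)[0]
--         if k not in seen: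
--             seen.add(k)
--             keys.append(k)
--     return {k: [l for l in links if l.split("/", 1)[0] == k] for k in keys}
-- ===== Notes on version B (the rewrite author's own statement) =====
-- stated objective: alternative
-- what changed: Instead of accumulating lists inside a dict during one pass, B first collects the distinct top-folder keys in first-seen order and then builds each group with a filtering comprehension over the link list.
import Mathlib
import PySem

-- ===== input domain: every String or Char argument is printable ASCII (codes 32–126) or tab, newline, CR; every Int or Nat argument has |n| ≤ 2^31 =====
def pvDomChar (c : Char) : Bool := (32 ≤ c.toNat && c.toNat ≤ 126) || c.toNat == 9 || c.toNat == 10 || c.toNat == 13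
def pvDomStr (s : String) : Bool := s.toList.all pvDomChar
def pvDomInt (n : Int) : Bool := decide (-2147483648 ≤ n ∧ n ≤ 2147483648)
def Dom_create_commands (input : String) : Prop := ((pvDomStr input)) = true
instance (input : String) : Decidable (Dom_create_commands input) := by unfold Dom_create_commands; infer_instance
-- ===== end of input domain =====

-- B replaces A's dict-accumulating single pass by collecting the distinct keys first
-- (first-seen order) and then building each group with a filter over the links (objective: alternative).

-- ===== PORT A =====
-- link.split("/", 1)[0]; splitMax? with sep "/" (nonempty) always returns `some` of a
-- nonempty list, so the getD/headD defaults are never used and the port is exact.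
def pvKey (link : String) : String :=
  (((PySem.Str.splitMax? link "/" 1).getD []).headD "")

def create_commands (input : String) : List (String × List String) :=
  let linkers : PySem.Dict String (List String) := PySem.Dict.empty
  if input ≠ "" then
    -- input.split(" "): sep nonempty, so split? is always `some` and getD [] is exact
    let links := (PySem.Str.split? input " ").getD []
    (links.foldl (fun d link =>
      let key := pvKey link
      if d.contains key then d.modify key [] (fun ls => ls ++ [link])
      else d.insert key [link]) linkers).items
  else
    linkers.items

-- ===== PORT B =====
def create_commands_alt (input : String) : List (String × List String) :=
  if input = "" then []
  else
    let links := (PySem.Str.split? input " ").getD []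
    let keys : PySem.Set String := PySem.Set.ofList (links.map pvKey)
    keys.map (fun k => (k, links.filter (fun l => pvKey l == k)))

-- ===== PRECONDITION & SPEC =====
def Spec_create_commands (input : String) (out : List (String × List String)) : Prop := out = create_commands_alt input
instance (input : String) (out : List (String × List String)) : Decidable (Spec_create_commands input out) := by unfold Spec_create_commands; infer_instance

-- ===== CLAIM (what is proved, stated in full; the proofs are below) =====
def Claim_equal_create_commands : Prop := ∀ (input : String), Dom_create_commands input → Spec_create_commands input (create_commands input)

-- ===== LEMMAS AND PROOFS =====

-- A's branching loop body is exactly a Dict.modify step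
theorem pv_step_eq_modify (d : PySem.Dict String (List String)) (link : String) :
    (if d.contains (pvKey link) then d.modify (pvKey link) [] (fun ls => ls ++ [link])
     else d.insert (pvKey link) [link])
    = d.modify (pvKey link) [] (fun ls => ls ++ [link]) := by
  by_cases h : d.contains (pvKey link)
  · simp [h]
  · simp only [Bool.not_eq_true] at h
    simp [h, PySem.Dict.modify, PySem.Dict.getD_of_not_contains d ([] : List String) h]

theorem create_commands_spec' (input : String) :
    create_commands input = create_commands_alt input := by
  unfold create_commands create_commands_alt
  by_cases h : input = ""
  · simp [h, PySem.Dict.empty]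
  · simp only [h, ne_eq, not_false_iff, if_true, if_false]
    set links := (PySem.Str.split? input " ").getD [] with hlinks
    have hstep : (links.foldl (fun d link =>
        let key := pvKey link
        if d.contains key then d.modify key [] (fun ls => ls ++ [link])
        else d.insert key [link]) (PySem.Dict.empty : PySem.Dict String (List String)))
        = links.foldl (fun d link => d.modify (pvKey link) [] (fun ls => ls ++ [link]))
            PySem.Dict.empty :=
      PySem.List.foldl_congr_mem links _ _ _ (fun d l _ => pv_step_eq_modify d l)
    rw [hstep]
    have hnd : (links.foldl (fun d link => d.modify (pvKey link) [] (fun ls => ls ++ [link]))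
        (PySem.Dict.empty : PySem.Dict String (List String))).keys.Nodup :=
      PySem.Dict.nodup_keys_foldl_modify_key links pvKey [] (fun _ x ls => ls ++ [x]) _
        (by simp [PySem.Dict.keys_empty])
    rw [PySem.Dict.items_eq_map_keys _ hnd []]
    have hkeys : (links.foldl (fun d link => d.modify (pvKey link) [] (fun ls => ls ++ [link]))
        (PySem.Dict.empty : PySem.Dict String (List String))).keys
        = PySem.Set.ofList (links.map pvKey) := by
      rw [PySem.Dict.keys_foldl_modify_key links pvKey [] (fun _ x ls => ls ++ [x]) _,
        PySem.Dict.keys_empty, PySem.Set.update_nil_left]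
    rw [hkeys]
    refine List.map_congr_left (fun k _ => ?_)
    have hpairs : links.foldl (fun d link => d.modify (pvKey link) [] (fun ls => ls ++ [link]))
        (PySem.Dict.empty : PySem.Dict String (List String))
        = (links.map (fun l => (pvKey l, l))).foldl
            (fun d p => d.modify p.1 [] (fun ls => ls ++ [p.2])) PySem.Dict.empty :=
      by rw [List.foldl_map]
    rw [hpairs, PySem.Dict.getD_foldl_modify_append]
    simp [PySem.Dict.getD_empty, List.filter_map, Function.comp_def]

-- ===== VERDICT (by name: the statement is the Claim_ definition above) =====
theorem create_commands_spec : Claim_equal_create_commands := by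
  intro input _
  unfold Spec_create_commands
  exact create_commands_spec' input
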